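-- pv_equiv track=rewrite | github.com/fabiotapro/greed | test-space/call_graph.py | get_relevant_functions
-- ===== SOURCE A (Python) =====
-- def get_relevant_functions(function_callees, oracle_callers):
--     """
--     Recursively finds all functions that can eventually call an oracle function.
--     """
--     relevant_functions = set()
--
--     def recurse(func):
--         if func in relevant_functions:
--             return  # Avoid revisiting
--         relevant_functions.add(func)
--         callees = function_callees.get(func, [])
--         for callee in callees:
--             recurse(callee)
--
--     for caller in oracle_callers:
--         recurse(caller)
--
--     return relevant_functions
-- ===== SOURCE B (Python) =====
-- def get_relevant_functions(function_callees, oracle_callers):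
--     """Iterative DFS with an explicit stack instead of recursion."""
--     relevant_functions = set()
--     stack = list(reversed(oracle_callers))
--     while stack:
--         func = stack.pop()
--         if func in relevant_functions:
--             continue
--         relevant_functions.add(func)
--         stack.extend(reversed(function_callees.get(func, [])))
--     return relevant_functions
-- ===== Notes on version B (the rewrite author's own statement) =====
-- stated objective: alternative
-- what changed: Replaces the nested recursive helper with an iterative depth-first search over an explicit worklist stack (reversed pushes preserve the visit order), avoiding Python recursion depth limits.
import Mathlib
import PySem

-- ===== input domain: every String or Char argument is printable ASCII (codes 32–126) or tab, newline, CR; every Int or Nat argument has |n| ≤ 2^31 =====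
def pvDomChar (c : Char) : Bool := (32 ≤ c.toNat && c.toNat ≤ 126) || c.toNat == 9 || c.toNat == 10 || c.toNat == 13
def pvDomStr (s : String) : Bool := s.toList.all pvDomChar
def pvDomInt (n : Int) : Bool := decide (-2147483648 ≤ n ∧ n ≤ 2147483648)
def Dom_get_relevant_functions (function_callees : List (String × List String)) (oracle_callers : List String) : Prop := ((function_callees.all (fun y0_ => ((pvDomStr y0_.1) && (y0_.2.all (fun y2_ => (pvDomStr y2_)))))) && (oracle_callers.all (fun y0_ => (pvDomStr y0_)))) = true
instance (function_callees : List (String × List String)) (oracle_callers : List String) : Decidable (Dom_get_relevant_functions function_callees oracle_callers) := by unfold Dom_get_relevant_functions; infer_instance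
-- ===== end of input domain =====

-- B replaces A's recursive helper by an iterative DFS over an explicit stack
-- (reversed pushes keep A's visit order); same asymptotic cost (objective: alternative).

-- ===== PORT A =====
-- all strings in the callee lists, concatenated (used only as a termination bound)
def pvFlat (function_callees : List (String × List String)) : List String :=
  function_callees.flatMap (·.2)

-- A's inner `recurse`; the Nat fuel is only a termination guard, proved sufficient below
def pvRecurse (function_callees : List (String × List String)) : Nat → List String → String → List String
  | 0, visited, _ => visited
  | fuel + 1, visited, func =>
    if PySem.Set.contains visited func then visited
    else ((PySem.Dict.mk function_callees).getD func []).foldl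
      (pvRecurse function_callees fuel) (PySem.Set.add visited func)

def get_relevant_functions (function_callees : List (String × List String)) (oracle_callers : List String) : List String :=
  oracle_callers.foldl
    (pvRecurse function_callees ((oracle_callers ++ pvFlat function_callees).length + 1)) []

-- ===== PORT B =====
-- termination measure for the worklist loop, and the lemmas its decreasing_by cites
def pvMeas (function_callees : List (String × List String)) (visited stack : List String) : Nat :=
  ((stack ++ pvFlat function_callees).toFinset \ visited.toFinset).card
    * ((pvFlat function_callees).length + 2) + stack.length

theorem pvCallees_subset (fc : List (String × List String)) (f : String) :
    ∀ x ∈ (PySem.Dict.mk fc).getD f [], x ∈ pvFlat fc := by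
  induction fc with
  | nil => simp [PySem.Dict.getD, PySem.Dict.get?]
  | cons p rest ih =>
    rw [show PySem.Dict.mk (p :: rest) = PySem.Dict.mk ((p.1, p.2) :: rest) from rfl,
      PySem.Dict.getD_eq_get?_getD, PySem.Dict.get?_mk_cons]
    intro x hx
    simp only [pvFlat, List.flatMap_cons, List.mem_append]
    by_cases h : p.1 == f
    · simp only [h, if_pos] at hx; exact Or.inl hx
    · rw [if_neg h, ← PySem.Dict.getD_eq_get?_getD] at hx
      exact Or.inr (ih x hx)

theorem pvCallees_len (fc : List (String × List String)) (f : String) :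
    ((PySem.Dict.mk fc).getD f []).length ≤ (pvFlat fc).length := by
  induction fc with
  | nil => simp [PySem.Dict.getD, PySem.Dict.get?]
  | cons p rest ih =>
    rw [show PySem.Dict.mk (p :: rest) = PySem.Dict.mk ((p.1, p.2) :: rest) from rfl,
      PySem.Dict.getD_eq_get?_getD, PySem.Dict.get?_mk_cons]
    simp only [pvFlat, List.flatMap_cons, List.length_append]
    split
    · simp
    · rw [← PySem.Dict.getD_eq_get?_getD]
      have := ih
      simp only [pvFlat] at this
      omega

theorem pvMeas_lt_skip (fc : List (String × List String)) (v : List String)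
    (stack : List String) (h : stack ≠ []) :
    pvMeas fc v stack.dropLast < pvMeas fc v stack := by
  unfold pvMeas
  have hsub : (stack.dropLast ++ pvFlat fc).toFinset \ v.toFinset
      ⊆ (stack ++ pvFlat fc).toFinset \ v.toFinset := by
    apply Finset.sdiff_subset_sdiff _ (subset_refl _)
    intro x hx
    simp only [List.mem_toFinset, List.mem_append] at hx ⊢
    exact hx.imp (fun hx => (List.dropLast_sublist stack).subset hx) id
  have hcard := Finset.card_le_card hsub
  have hlen : stack.dropLast.length < stack.length := by
    have := List.length_pos_iff.mpr h
    simp [List.length_dropLast]; omega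
  have := Nat.mul_le_mul_right ((pvFlat fc).length + 2) hcard
  omega

theorem pvMeas_lt_new (fc : List (String × List String)) (v : List String)
    (stack : List String) (f : String) (h : stack.getLast? = some f) (hf : f ∉ v) :
    pvMeas fc (v ++ [f]) (stack.dropLast ++ ((PySem.Dict.mk fc).getD f []).reverse)
      < pvMeas fc v stack := by
  unfold pvMeas
  set S := (stack ++ pvFlat fc).toFinset \ v.toFinset with hS
  have hfS : f ∈ S := by
    simp only [hS, Finset.mem_sdiff, List.mem_toFinset, List.mem_append]
    exact ⟨Or.inl (List.mem_of_getLast? h), hf⟩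
  have hsub : (stack.dropLast ++ ((PySem.Dict.mk fc).getD f []).reverse ++ pvFlat fc).toFinset
      \ (v ++ [f]).toFinset ⊆ S.erase f := by
    intro x hx
    simp only [Finset.mem_sdiff, List.mem_toFinset, List.mem_append, Finset.mem_erase, hS,
      List.mem_reverse, List.mem_singleton, not_or] at hx ⊢
    obtain ⟨hx1, hx2, hx3⟩ := hx
    refine ⟨hx3, ?_, hx2⟩
    rcases hx1 with (hx1 | hx1) | hx1
    · exact Or.inl ((List.dropLast_sublist stack).subset hx1)
    · exact Or.inr (pvCallees_subset fc f x hx1)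
    · exact Or.inr hx1
  have hcard : ((stack.dropLast ++ ((PySem.Dict.mk fc).getD f []).reverse ++ pvFlat fc).toFinset
      \ (v ++ [f]).toFinset).card ≤ S.card - 1 := by
    have := Finset.card_le_card hsub
    rw [Finset.card_erase_of_mem hfS] at this
    exact this
  have hpos : 1 ≤ S.card := Finset.card_pos.mpr ⟨f, hfS⟩
  have hlen : stack.dropLast.length < stack.length := by
    have : stack ≠ [] := by intro e; rw [e] at h; simp at h
    have := List.length_pos_iff.mpr this
    simp [List.length_dropLast]; omega
  have hcal : ((PySem.Dict.mk fc).getD f []).length ≤ (pvFlat fc).length := pvCallees_len fc f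
  set K := (pvFlat fc).length + 2 with hK
  set c := S.card with hc
  set c' := ((stack.dropLast ++ ((PySem.Dict.mk fc).getD f []).reverse ++ pvFlat fc).toFinset
      \ (v ++ [f]).toFinset).card with hc'
  have h1 : c' * K ≤ (c - 1) * K := Nat.mul_le_mul_right K hcard
  have h2 : (c - 1) * K + K = c * K := by
    have : (c - 1) + 1 = c := by omega
    calc (c - 1) * K + K = ((c - 1) + 1) * K := by ring
    _ = c * K := by rw [this]
  simp only [List.length_append, List.length_reverse]
  omega

-- B's worklist loop: pop from the end of the stack, push callees reversed
def pvLoop (function_callees : List (String × List String)) (visited stack : List String) : List String :=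
  match h : stack.getLast? with
  | none => visited
  | some func =>
    if hv : PySem.Set.contains visited func then
      pvLoop function_callees visited stack.dropLast
    else
      pvLoop function_callees (PySem.Set.add visited func)
        (stack.dropLast ++ ((PySem.Dict.mk function_callees).getD func []).reverse)
termination_by pvMeas function_callees visited stack
decreasing_by
  · exact pvMeas_lt_skip function_callees visited stack (by intro e; rw [e] at h; simp at h)
  · have hnf : func ∉ visited := by
      intro hm
      exact hv ((PySem.Set.contains_iff visited func).mpr hm)
    have : PySem.Set.add visited func = visited ++ [func] := by
      simp [PySem.Set.add, PySem.Set.contains] at hv ⊢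
      intro hm; exact absurd hm hnf
    rw [this]
    exact pvMeas_lt_new function_callees visited stack func h hnf

def get_relevant_functions_alt (function_callees : List (String × List String)) (oracle_callers : List String) : List String :=
  pvLoop function_callees [] oracle_callers.reverse

-- ===== PRECONDITION & SPEC =====
def Spec_get_relevant_functions (function_callees : List (String × List String)) (oracle_callers : List String) (out : List String) : Prop := out = get_relevant_functions_alt function_callees oracle_callers
instance (function_callees : List (String × List String)) (oracle_callers : List String) (out : List String) : Decidable (Spec_get_relevant_functions function_callees oracle_callers out) := by unfold Spec_get_relevant_functions; infer_instance

-- ===== CLAIM (what is proved, stated in full; the proofs are below) =====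
def Claim_equal_get_relevant_functions : Prop := ∀ (function_callees : List (String × List String)) (oracle_callers : List String), Dom_get_relevant_functions function_callees oracle_callers → Spec_get_relevant_functions function_callees oracle_callers (get_relevant_functions function_callees oracle_callers)

-- ===== LEMMAS AND PROOFS =====
theorem pvLoop_nil (fc : List (String × List String)) (v : List String) :
    pvLoop fc v [] = v := by
  rw [pvLoop]
  split
  · rfl
  · next heq => simp at heq

theorem pvLoop_snoc (fc : List (String × List String)) (v s : List String) (f : String) :
    pvLoop fc v (s ++ [f]) =
      if PySem.Set.contains v f then pvLoop fc v s
      else pvLoop fc (PySem.Set.add v f) (s ++ ((PySem.Dict.mk fc).getD f []).reverse) := by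
  rw [pvLoop]
  split
  · next heq => rw [List.getLast?_concat] at heq; cases heq
  · next g heq =>
      rw [List.getLast?_concat] at heq
      cases heq
      rw [List.dropLast_concat]
      split <;> rfl


theorem pvLoop_append (fc : List (String × List String)) (v t : List String) :
    ∀ s, pvLoop fc v (s ++ t) = pvLoop fc (pvLoop fc v t) s := by
  induction v, t using pvLoop.induct fc with
  | case1 v t ht =>
    intro s
    rw [List.getLast?_eq_none_iff.mp ht, List.append_nil, pvLoop_nil]
  | case2 v t f ht hv ih =>
    intro s
    obtain ⟨t', rfl⟩ := List.getLast?_eq_some_iff.mp ht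
    rw [List.dropLast_concat] at ih
    rw [show s ++ (t' ++ [f]) = (s ++ t') ++ [f] from (List.append_assoc s t' [f]).symm,
      pvLoop_snoc, if_pos hv, pvLoop_snoc, if_pos hv]
    exact ih s
  | case3 v t f ht hv ih =>
    intro s
    obtain ⟨t', rfl⟩ := List.getLast?_eq_some_iff.mp ht
    rw [List.dropLast_concat] at ih
    rw [show s ++ (t' ++ [f]) = (s ++ t') ++ [f] from (List.append_assoc s t' [f]).symm,
      pvLoop_snoc, if_neg hv, pvLoop_snoc, if_neg hv, List.append_assoc]
    exact ih s

theorem pvLoop_mem_mono (fc : List (String × List String)) (v s : List String) :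
    ∀ x ∈ v, x ∈ pvLoop fc v s := by
  induction v, s using pvLoop.induct fc with
  | case1 v s hs =>
    intro x hx
    rw [List.getLast?_eq_none_iff.mp hs, pvLoop_nil]
    exact hx
  | case2 v s f hs hv ih =>
    intro x hx
    obtain ⟨s', rfl⟩ := List.getLast?_eq_some_iff.mp hs
    rw [List.dropLast_concat] at ih
    rw [pvLoop_snoc, if_pos hv]
    exact ih x hx
  | case3 v s f hs hv ih =>
    intro x hx
    obtain ⟨s', rfl⟩ := List.getLast?_eq_some_iff.mp hs
    rw [List.dropLast_concat] at ih
    rw [pvLoop_snoc, if_neg hv]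
    apply ih
    unfold PySem.Set.add
    split
    · exact hx
    · exact List.mem_append_left _ hx

-- the erase-based strict decrease of the unvisited count, shared by both IH uses
theorem pvCard_lt (fc : List (String × List String)) (v rest l : List String) (f : String)
    (hl : ∀ x ∈ l, x ∈ f :: rest ++ pvFlat fc) (hf : f ∉ v) :
    ((l ++ pvFlat fc).toFinset \ (v ++ [f]).toFinset).card + 1
      ≤ (((f :: rest) ++ pvFlat fc).toFinset \ v.toFinset).card := by
  set S := ((f :: rest ++ pvFlat fc).toFinset \ v.toFinset) with hS
  have hfS : f ∈ S := by
    simp only [hS, Finset.mem_sdiff, List.mem_toFinset]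
    exact ⟨List.mem_cons_self, hf⟩
  have hsub : (l ++ pvFlat fc).toFinset \ (v ++ [f]).toFinset ⊆ S.erase f := by
    intro x hx
    obtain ⟨hxin, hxout⟩ := Finset.mem_sdiff.mp hx
    have hxv : x ∉ v ∧ x ≠ f := by
      simp only [List.mem_toFinset, List.mem_append, List.mem_singleton] at hxout
      tauto
    have hxS : x ∈ S := by
      rw [hS, Finset.mem_sdiff]
      refine ⟨?_, by simp only [List.mem_toFinset]; exact hxv.1⟩
      simp only [List.mem_toFinset, List.mem_append] at hxin ⊢
      simp only [List.mem_cons]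
      rcases hxin with hx1 | hx1
      · have := hl x hx1
        simp only [List.mem_cons, List.mem_append] at this
        tauto
      · tauto
    exact Finset.mem_erase.mpr ⟨hxv.2, hxS⟩
  have := Finset.card_le_card hsub
  rw [Finset.card_erase_of_mem hfS] at this
  have hpos : 1 ≤ S.card := Finset.card_pos.mpr ⟨f, hfS⟩
  omega

theorem pvCard_mono_visited (fc : List (String × List String)) (l v v' : List String)
    (h : ∀ x ∈ v, x ∈ v') :
    ((l ++ pvFlat fc).toFinset \ v'.toFinset).card
      ≤ ((l ++ pvFlat fc).toFinset \ v.toFinset).card := by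
  apply Finset.card_le_card
  apply Finset.sdiff_subset_sdiff (subset_refl _)
  intro x hx
  simp only [List.mem_toFinset] at hx ⊢
  exact h x hx

-- the main simulation: A's fueled recursion over a worklist equals B's stack loop
theorem pvMain (fc : List (String × List String)) :
    ∀ fuel funcs v,
      ((funcs ++ pvFlat fc).toFinset \ v.toFinset).card + 1 ≤ fuel →
      funcs.foldl (pvRecurse fc fuel) v = pvLoop fc v funcs.reverse := by
  intro fuel
  induction fuel using Nat.strong_induction_on with
  | _ fuel IHf =>
  intro funcs
  induction funcs with
  | nil =>
    intro v _
    simp [pvLoop_nil]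
  | cons f rest IHr =>
    intro v h
    obtain ⟨F, rfl⟩ : ∃ F, fuel = F + 1 := ⟨fuel - 1, by omega⟩
    simp only [List.foldl_cons, List.reverse_cons]
    by_cases hv : f ∈ v
    · have hc : PySem.Set.contains v f = true := (PySem.Set.contains_iff v f).mpr hv
      rw [show pvRecurse fc (F + 1) v f = v by rw [pvRecurse, if_pos hc]]
      rw [pvLoop_snoc, if_pos hc]
      apply IHr
      have : ((rest ++ pvFlat fc).toFinset \ v.toFinset).card
          ≤ (((f :: rest) ++ pvFlat fc).toFinset \ v.toFinset).card := by
        apply Finset.card_le_card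
        apply Finset.sdiff_subset_sdiff _ (subset_refl _)
        intro x hx
        simp only [List.mem_toFinset, List.mem_append, List.mem_cons] at hx ⊢
        tauto
      omega
    · have hc : ¬ PySem.Set.contains v f = true := fun hm =>
        hv ((PySem.Set.contains_iff v f).mp hm)
      have hadd : PySem.Set.add v f = v ++ [f] := by
        simp only [PySem.Set.add]
        rw [if_neg hc]
      have hcal : ∀ x ∈ (PySem.Dict.mk fc).getD f [], x ∈ f :: rest ++ pvFlat fc := by
        intro x hx
        exact List.mem_cons_of_mem f (List.mem_append_right rest (pvCallees_subset fc f x hx))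
      have hcard := pvCard_lt fc v rest ((PySem.Dict.mk fc).getD f []) f hcal hv
      have hrec : pvRecurse fc (F + 1) v f
          = pvLoop fc (v ++ [f]) ((PySem.Dict.mk fc).getD f []).reverse := by
        rw [pvRecurse, if_neg hc, hadd]
        exact IHf F (by omega) _ _ (by omega)
      rw [hrec, pvLoop_snoc, if_neg hc, hadd, pvLoop_append]
      apply IHr
      have hmono : ∀ x ∈ v ++ [f], x ∈ pvLoop fc (v ++ [f]) ((PySem.Dict.mk fc).getD f []).reverse :=
        pvLoop_mem_mono fc (v ++ [f]) _
      have h1 := pvCard_mono_visited fc rest (v ++ [f]) _ hmono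
      have h2 := pvCard_lt fc v rest rest f (by intro x hx; simp [hx]) hv
      omega

-- ===== VERDICT (by name: the statement is the Claim_ definition above) =====
theorem get_relevant_functions_spec : Claim_equal_get_relevant_functions := by
  intro fc oc _
  unfold Spec_get_relevant_functions get_relevant_functions get_relevant_functions_alt
  apply pvMain
  simp only [List.toFinset_nil, Finset.sdiff_empty]
  have := List.toFinset_card_le (oc ++ pvFlat fc)
  simp only [List.length_append] at this ⊢
  omega
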